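-- pv_equiv track=rewrite | github.com/edaaydinea/HackerRank | Algorithms/04 - Sorting/Distant Pairs.py | diviser
-- ===== SOURCE A (Python) =====
-- def primary_distance(a, b, c):
--     dist_array = min(abs(a - b), c - abs(a - b))
--     return (dist_array)
--
-- def distance_array(array, c):
--     assert (len(array) == 2)
--     a_1, b_1 = tuple(array[0])
--     a_2, b_2 = tuple(array[1])
--     d_1 = primary_distance(a_1, b_1, c)
--     d_2 = primary_distance(a_1, b_2, c)
--     d_3 = primary_distance(a_1, a_2, c)
--     d_4 = primary_distance(b_1, a_2, c)
--     d_5 = primary_distance(b_1, b_2, c)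
--     d_6 = primary_distance(a_2, b_2, c)
--     return (min(d_1, min(d_2, min(d_3, min(d_4, min(d_5, d_6))))))
--
-- def diviser(array, c, point):
--     n = len(array)
--     if n == 1:
--         return (distance_array([point, array[0]], c))
--     else:
--         array_1 = array[:n // 2]
--         array_2 = array[n // 2:]
--         return max(diviser(array_1, c, point), diviser(array_2, c, point))
-- ===== SOURCE B (Python) =====
-- def primary_distance(a, b, c):
--     dist_array = min(abs(a - b), c - abs(a - b))
--     return (dist_array)
--
-- def distance_array(array, c):
--     assert (len(array) == 2)
--     a_1, b_1 = tuple(array[0])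
--     a_2, b_2 = tuple(array[1])
--     d_1 = primary_distance(a_1, b_1, c)
--     d_2 = primary_distance(a_1, b_2, c)
--     d_3 = primary_distance(a_1, a_2, c)
--     d_4 = primary_distance(b_1, a_2, c)
--     d_5 = primary_distance(b_1, b_2, c)
--     d_6 = primary_distance(a_2, b_2, c)
--     return (min(d_1, min(d_2, min(d_3, min(d_4, min(d_5, d_6))))))
--
-- def diviser(array, c, point):
--     # One flat pass: seed with the first element, keep the running maximum.
--     best = distance_array([point, array[0]], c)
--     for e in array[1:]:
--         d = distance_array([point, e], c)
--         if best < d: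
--             best = d
--     return best
-- ===== Notes on version B (the rewrite author's own statement) =====
-- stated objective: simpler
-- what changed: Replaces the divide-and-conquer recursion (split in halves, max of the two recursive calls) by a single accumulator loop over the elements keeping the running maximum.
-- outside the precondition, e.g. on diviser([], 5, (0, 0)): A raises RecursionError, B raises IndexError
import Mathlib
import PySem

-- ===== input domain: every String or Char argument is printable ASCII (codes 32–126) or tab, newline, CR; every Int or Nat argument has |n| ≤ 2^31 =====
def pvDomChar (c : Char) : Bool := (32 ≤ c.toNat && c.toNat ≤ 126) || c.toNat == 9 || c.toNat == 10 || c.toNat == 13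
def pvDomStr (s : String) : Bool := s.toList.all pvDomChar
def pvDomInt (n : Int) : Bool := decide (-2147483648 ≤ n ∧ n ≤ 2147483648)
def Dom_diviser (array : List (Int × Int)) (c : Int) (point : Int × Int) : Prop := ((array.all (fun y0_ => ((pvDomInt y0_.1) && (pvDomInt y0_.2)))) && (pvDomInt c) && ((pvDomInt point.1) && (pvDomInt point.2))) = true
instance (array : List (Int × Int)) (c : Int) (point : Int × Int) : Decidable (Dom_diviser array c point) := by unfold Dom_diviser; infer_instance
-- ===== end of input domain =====

-- B replaces A's halve-and-recurse maximum by one flat accumulator loop over the elements (simpler).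

-- ===== PORT A =====
def primary_distance (a b c : Int) : Int := min |a - b| (c - |a - b|)

-- Python's distance_array takes a 2-element list [p, q]; ported with the two elements as
-- pair arguments (exact: both programs only ever call it with exactly two elements).
def distance_array (p q : Int × Int) (c : Int) : Int :=
  let d_1 := primary_distance p.1 p.2 c
  let d_2 := primary_distance p.1 q.2 c
  let d_3 := primary_distance p.1 q.1 c
  let d_4 := primary_distance p.2 q.1 c
  let d_5 := primary_distance p.2 q.2 c
  let d_6 := primary_distance q.1 q.2 c
  min d_1 (min d_2 (min d_3 (min d_4 (min d_5 d_6))))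

-- array[:n//2] / array[n//2:] are List.take / List.drop (exact for this in-range nonnegative index).
-- On [] the Python recurses forever (RecursionError); excluded by Pre_diviser, port returns 0 there.
def diviser (array : List (Int × Int)) (c : Int) (point : Int × Int) : Int :=
  match array with
  | [] => 0
  | [x] => distance_array point x c
  | x :: y :: rest =>
    let n : Nat := (x :: y :: rest).length
    max (diviser ((x :: y :: rest).take (n / 2)) c point)
        (diviser ((x :: y :: rest).drop (n / 2)) c point)
termination_by array.length
decreasing_by
  · simp [List.length_take]; omega
  · simp; omega

-- ===== PORT B =====
-- On [] the Python B raises IndexError (array[0]); excluded by Pre_diviser, port returns 0 there.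
def diviser_alt (array : List (Int × Int)) (c : Int) (point : Int × Int) : Int :=
  match array with
  | [] => 0
  | x :: rest =>
    rest.foldl
      (fun best e =>
        let d := distance_array point e c
        if best < d then d else best)
      (distance_array point x c)

-- ===== PRECONDITION & SPEC =====
-- Pre_ excludes only the empty array, on which both Pythons raise (A RecursionError, B IndexError).
def Pre_diviser (array : List (Int × Int)) (c : Int) (point : Int × Int) : Prop := array ≠ []
instance (array : List (Int × Int)) (c : Int) (point : Int × Int) : Decidable (Pre_diviser array c point) := by unfold Pre_diviser; infer_instance

def pvWitness_diviser : (List (Int × Int)) × Int × (Int × Int) := ([(1, 2), (3, 9), (5, 5)], 10, (0, 3))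

def Spec_diviser (array : List (Int × Int)) (c : Int) (point : Int × Int) (out : Int) : Prop := out = diviser_alt array c point
instance (array : List (Int × Int)) (c : Int) (point : Int × Int) (out : Int) : Decidable (Spec_diviser array c point out) := by unfold Spec_diviser; infer_instance

-- ===== CLAIM (what is proved, stated in full; the proofs are below) =====
def Claim_equal_diviser : Prop := ∀ (array : List (Int × Int)) (c : Int) (point : Int × Int), Dom_diviser array c point → Pre_diviser array c point → Spec_diviser array c point (diviser array c point)

-- ===== LEMMAS AND PROOFS =====

-- B's accumulator step is just `max` on Int.
theorem alt_maxfold (c : Int) (point : Int × Int) (x : Int × Int) (r : List (Int × Int)) :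
    diviser_alt (x :: r) c point
      = r.foldl (fun b e => max b (distance_array point e c)) (distance_array point x c) := by
  simp only [diviser_alt]
  congr 1
  funext b e
  simp only [max_def]
  split_ifs <;> omega

theorem maxfold_shift (f : (Int × Int) → Int) (l : List (Int × Int)) :
    ∀ (a b : Int), l.foldl (fun x e => max x (f e)) (max a b) = max a (l.foldl (fun x e => max x (f e)) b) := by
  induction l with
  | nil => intro a b; simp
  | cons e t ih => intro a b; simp only [List.foldl, max_assoc]; exact ih a _

theorem alt_append (c : Int) (point : Int × Int) (l₁ l₂ : List (Int × Int))
    (h₁ : l₁ ≠ []) (h₂ : l₂ ≠ []) :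
    diviser_alt (l₁ ++ l₂) c point = max (diviser_alt l₁ c point) (diviser_alt l₂ c point) := by
  obtain ⟨x, r, rfl⟩ := List.exists_cons_of_ne_nil h₁
  obtain ⟨y, s, rfl⟩ := List.exists_cons_of_ne_nil h₂
  rw [show (x :: r) ++ (y :: s) = x :: (r ++ y :: s) by simp]
  rw [alt_maxfold, alt_maxfold, alt_maxfold, List.foldl_append]
  simp only [List.foldl]
  exact maxfold_shift _ s _ _

theorem diviser_eq_alt (c : Int) (point : Int × Int) :
    ∀ (n : Nat) (l : List (Int × Int)), l.length ≤ n → l ≠ [] →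
      diviser l c point = diviser_alt l c point := by
  intro n
  induction n with
  | zero => intro l hl hne; cases l <;> simp_all
  | succ k ih =>
    intro l hl hne
    match l with
    | [x] => simp [diviser, diviser_alt]
    | x :: y :: rest =>
      rw [diviser]
      have hlen : (x :: y :: rest).length = rest.length + 2 := by simp
      set m := (x :: y :: rest).length / 2 with hm
      have hm1 : 1 ≤ m := by omega
      have hm2 : m < (x :: y :: rest).length := by omega
      have htake : ((x :: y :: rest).take m) ≠ [] := by
        intro h
        have := congrArg List.length h
        simp [List.length_take] at this
        omega
      have hdrop : ((x :: y :: rest).drop m) ≠ [] := by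
        intro h
        have := congrArg List.length h
        simp at this
        omega
      have hlt : ((x :: y :: rest).take m).length ≤ k := by
        simp [List.length_take]; omega
      have hld : ((x :: y :: rest).drop m).length ≤ k := by
        simp; omega
      rw [ih _ hlt htake, ih _ hld hdrop, ← alt_append c point _ _ htake hdrop,
        List.take_append_drop]

-- ===== VERDICT (by name: the statement is the Claim_ definition above) =====
theorem diviser_spec : Claim_equal_diviser := by
  intro array c point _ hpre
  unfold Spec_diviser
  exact diviser_eq_alt c point array.length array le_rfl hpre
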